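-- pv_equiv track=rewrite | github.com/kaluginpeter/Algorithms_and_structures_tasks | CodeWars/6kyu/Magic_Music_Box.py | magic_music_box
-- ===== SOURCE A (Python) =====
-- def magic_music_box(words):
--     if not words:
--         return words
--     output: list[str] = []
--     order: list[str] = ['DO', 'RE', 'MI', 'FA', 'SOL', 'LA', 'SI']
--     start: int = 0
--     main_valid: bool = True
--     while main_valid:
--         for main_idx in range(len(order)):
--             valid: bool = False
--             for word_idx in range(start, len(words)):
--                 if order[main_idx] in words[word_idx] and words[word_idx] not in output:
--                     output.append(words[word_idx])
--                     valid = True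
--                     start = word_idx + 1
--                     break
--             if not valid:
--                 for word_idx in range(len(words)):
--                     if order[main_idx] in words[word_idx] and words[word_idx] not in output:
--                         output.append(words[word_idx])
--                         valid = True
--                         start = word_idx + 1
--                         break
--                 if not valid:
--                     return output
--     return output
-- ===== SOURCE B (Python) =====
-- NOTES = ('DO', 'RE', 'MI', 'FA', 'SOL', 'LA', 'SI')
--
-- def magic_music_box(words):
--     if not words:
--         return words
--     table = {n: [i for i, w in enumerate(words) if n in w] for n in NOTES}
--     output = []
--     used = set()
--     start = 0
--     while True:
--         for note in NOTES:
--             idxs = table[note]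
--             choice = next((i for i in idxs if i >= start and words[i] not in used), None)
--             if choice is None:
--                 choice = next((i for i in idxs if words[i] not in used), None)
--             if choice is None:
--                 return output
--             output.append(words[choice])
--             used.add(words[choice])
--             start = choice + 1
-- ===== Notes on version B (the rewrite author's own statement) =====
-- stated objective: alternative
-- what changed: B precomputes a note-to-index-list table in one pass and keeps picked words in a set, so each note step scans only that note's index list with set membership tests instead of rescanning all words with a 'not in output' list test.
import Mathlib
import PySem

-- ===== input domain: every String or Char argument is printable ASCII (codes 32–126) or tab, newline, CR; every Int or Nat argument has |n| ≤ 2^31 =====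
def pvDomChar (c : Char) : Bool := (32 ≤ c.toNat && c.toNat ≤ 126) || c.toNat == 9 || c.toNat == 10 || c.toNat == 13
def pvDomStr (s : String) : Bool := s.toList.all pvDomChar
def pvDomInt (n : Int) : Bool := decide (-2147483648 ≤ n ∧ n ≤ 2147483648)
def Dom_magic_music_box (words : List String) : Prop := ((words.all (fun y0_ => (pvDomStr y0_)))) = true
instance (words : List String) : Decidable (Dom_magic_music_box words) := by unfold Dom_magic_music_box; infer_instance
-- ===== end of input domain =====

-- B replaces A's repeated full scans of `words` per note by a precomputed note→indices
-- table plus a used-value set (objective: alternative data structure, same observable result).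

-- ===== PORT A =====
-- order = ['DO','RE','MI','FA','SOL','LA','SI']
def pvOrder : List String := ["DO", "RE", "MI", "FA", "SOL", "LA", "SI"]

-- 'for word_idx in <idxs>: if order[m] in words[word_idx] and words[word_idx] not in output: … break'
def pvScanA (words out : List String) (note : String) (idxs : List Int) : Option Int :=
  idxs.find? (fun i =>
    PySem.Str.isIn note (PySem.List.pyGetD words i "") &&
    !(out.contains (PySem.List.pyGetD words i "")))

-- one iteration of A's 'for main_idx' body: forward scan from start, else wrap scan, else fail
def pvNoteStepA (words : List String) (note : String) (out : List String) (start : Int) :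
    Option (List String × Int) :=
  match pvScanA words out note (PySem.List.pyRange start (words.length : Int)) with
  | some i => some (out ++ [PySem.List.pyGetD words i ""], i + 1)
  | none =>
    match pvScanA words out note (PySem.List.pyRange 0 (words.length : Int)) with
    | some i => some (out ++ [PySem.List.pyGetD words i ""], i + 1)
    | none => none

-- the 'for main_idx in range(len(order))' loop; Sum.inl = the early 'return output'
def pvCycleA (words : List String) :
    List String → List String → Int → (List String ⊕ (List String × Int))
  | [], out, start => Sum.inr (out, start)
  | note :: rest, out, start =>
    match pvNoteStepA words note out start with
    | some (out', start') => pvCycleA words rest out' start'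
    | none => Sum.inl out

-- the 'while main_valid' loop; fuel words.length + 1 is enough: each completed cycle
-- appends 7 distinct word values, and output holds at most words.length distinct values
def pvWhileA (words : List String) : Nat → List String → Int → List String
  | 0, out, _ => out
  | fuel + 1, out, start =>
    match pvCycleA words pvOrder out start with
    | Sum.inl out' => out'
    | Sum.inr (out', start') => pvWhileA words fuel out' start'

def magic_music_box (words : List String) : List String :=
  if words = [] then words else pvWhileA words (words.length + 1) [] 0

-- ===== PORT B =====
def pvNotes : List String := ["DO", "RE", "MI", "FA", "SOL", "LA", "SI"]

-- [i for i, w in enumerate(words) if n in w]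
def pvIdxsB (words : List String) (note : String) : List Int :=
  ((PySem.List.enumerate words).filter (fun p => PySem.Str.isIn note p.2)).map (fun p => p.1)

-- table = {n: [...] for n in NOTES}
def pvTableB (words : List String) : PySem.Dict String (List Int) :=
  pvNotes.foldl (fun d n => d.insert n (pvIdxsB words n)) PySem.Dict.empty

-- the two next(...) expressions over the note's index list
def pvChooseB (words : List String) (used : PySem.Set String) (start : Int) (idxs : List Int) :
    Option Int :=
  match idxs.find? (fun i =>
      decide (start ≤ i) && !(PySem.Set.contains used (PySem.List.pyGetD words i ""))) with
  | some i => some i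
  | none => idxs.find? (fun i => !(PySem.Set.contains used (PySem.List.pyGetD words i "")))

-- the 'for note in NOTES' loop; Sum.inl = the 'return output'
def pvCycleB (words : List String) (table : PySem.Dict String (List Int)) :
    List String → List String → PySem.Set String → Int →
    (List String ⊕ (List String × PySem.Set String × Int))
  | [], out, used, start => Sum.inr (out, used, start)
  | note :: rest, out, used, start =>
    match pvChooseB words used start (table.getD note []) with
    | none => Sum.inl out
    | some i =>
      pvCycleB words table rest (out ++ [PySem.List.pyGetD words i ""])
        (used.add (PySem.List.pyGetD words i "")) (i + 1)

-- the 'while True' loop, same fuel bound as A's port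
def pvWhileB (words : List String) (table : PySem.Dict String (List Int)) :
    Nat → List String → PySem.Set String → Int → List String
  | 0, out, _, _ => out
  | fuel + 1, out, used, start =>
    match pvCycleB words table pvNotes out used start with
    | Sum.inl out' => out'
    | Sum.inr (out', used', start') => pvWhileB words table fuel out' used' start'

def magic_music_box_alt (words : List String) : List String :=
  if words = [] then words
  else pvWhileB words (pvTableB words) (words.length + 1) [] PySem.Set.empty 0

-- ===== PRECONDITION & SPEC =====
def Spec_magic_music_box (words : List String) (out : List String) : Prop := out = magic_music_box_alt words
instance (words : List String) (out : List String) : Decidable (Spec_magic_music_box words out) := by unfold Spec_magic_music_box; infer_instance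

-- ===== CLAIM (what is proved, stated in full; the proofs are below) =====
def Claim_equal_magic_music_box : Prop := ∀ (words : List String), Dom_magic_music_box words → Spec_magic_music_box words (magic_music_box words)

-- ===== LEMMAS AND PROOFS =====

-- generic find? facts not present in the library
theorem pv_find?_filter (l : List Int) (p q : Int → Bool) :
    (l.filter p).find? q = l.find? (fun a => p a && q a) := by
  induction l with
  | nil => rfl
  | cons x xs ih =>
    by_cases hp : p x <;> by_cases hq : q x <;>
      simp [hp, hq, ih]

theorem pv_find?_congr (l : List Int) (p q : Int → Bool) (h : ∀ x ∈ l, p x = q x) :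
    l.find? p = l.find? q := by
  induction l with
  | nil => rfl
  | cons x xs ih =>
    have hx := h x (by simp)
    by_cases hp : p x
    · simp [hp, hx ▸ hp]
    · have hq : ¬ q x = true := by rw [← hx]; exact hp
      rw [List.find?_cons_of_neg hp, List.find?_cons_of_neg hq]
      exact ih (fun x hx => h x (by simp [hx]))

-- table lookup: for every note of the scale the dict returns its index list
theorem pv_table_getD (words : List String) (note : String) (h : note ∈ pvNotes) :
    (pvTableB words).getD note [] = pvIdxsB words note := by
  fin_cases h <;> rfl

-- the index list is the filtered range
theorem pv_idxs_eq (words : List String) (note : String) :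
    pvIdxsB words note =
      (PySem.List.pyRange 0 (words.length : Int)).filter
        (fun i => PySem.Str.isIn note (PySem.List.pyGetD words i "")) := by
  unfold pvIdxsB
  rw [PySem.List.enumerate_eq_map_pyRange words "", List.filter_map, List.map_map]
  simp [PySem.List.len, Function.comp_def]

-- phase 1: A's forward scan = B's first next(...) over the table list
theorem pv_phase1 (words out : List String) (used : PySem.Set String) (note : String)
    (start : Int) (h0 : 0 ≤ start) (hn : start ≤ (words.length : Int))
    (hused : ∀ x, x ∈ used ↔ x ∈ out) :
    pvScanA words out note (PySem.List.pyRange start (words.length : Int)) =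
      (pvIdxsB words note).find? (fun i =>
        decide (start ≤ i) && !(PySem.Set.contains used (PySem.List.pyGetD words i ""))) := by
  rw [pv_idxs_eq, pv_find?_filter]
  rw [PySem.List.pyRange_one_append 0 start (words.length : Int) h0 hn, List.find?_append]
  unfold pvScanA
  have h1 : (PySem.List.pyRange 0 start).find? (fun a =>
      PySem.Str.isIn note (PySem.List.pyGetD words a "") &&
      (decide (start ≤ a) && !used.contains (PySem.List.pyGetD words a ""))) = none := by
    rw [List.find?_eq_none]
    intro x hx
    have : x < start := (PySem.List.mem_pyRange_one.mp hx).2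
    simp [not_le.mpr this]
  rw [h1, Option.none_or]
  apply pv_find?_congr
  intro x hx
  have : start ≤ x := (PySem.List.mem_pyRange_one.mp hx).1
  simp [this, hused]

-- phase 2: A's wrap scan = B's second next(...)
theorem pv_phase2 (words out : List String) (used : PySem.Set String) (note : String)
    (hused : ∀ x, x ∈ used ↔ x ∈ out) :
    pvScanA words out note (PySem.List.pyRange 0 (words.length : Int)) =
      (pvIdxsB words note).find? (fun i =>
        !(PySem.Set.contains used (PySem.List.pyGetD words i ""))) := by
  rw [pv_idxs_eq, pv_find?_filter]
  unfold pvScanA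
  apply pv_find?_congr
  intro x _
  simp [hused]

-- the related outcomes of one cycle
def pvRel (n : Int) (a : List String ⊕ (List String × Int))
    (b : List String ⊕ (List String × PySem.Set String × Int)) : Prop :=
  match a, b with
  | Sum.inl o, Sum.inl o' => o = o'
  | Sum.inr (o, s), Sum.inr (o', u, s') =>
      o = o' ∧ s = s' ∧ (∀ x, x ∈ u ↔ x ∈ o) ∧ 0 ≤ s ∧ s ≤ n
  | _, _ => False

theorem pv_cycle (words : List String) (notes : List String) (hsub : ∀ x ∈ notes, x ∈ pvNotes)
    (out : List String) (used : PySem.Set String) (start : Int)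
    (h0 : 0 ≤ start) (hn : start ≤ (words.length : Int))
    (hused : ∀ x, x ∈ used ↔ x ∈ out) :
    pvRel (words.length : Int) (pvCycleA words notes out start)
      (pvCycleB words (pvTableB words) notes out used start) := by
  induction notes generalizing out used start with
  | nil => exact ⟨rfl, rfl, hused, h0, hn⟩
  | cons note rest ih =>
    have hmem : note ∈ pvNotes := hsub note (by simp)
    have hrest : ∀ x ∈ rest, x ∈ pvNotes := fun x hx => hsub x (by simp [hx])
    simp only [pvCycleA, pvCycleB, pvNoteStepA, pvChooseB, pv_table_getD words note hmem]
    rw [pv_phase1 words out used note start h0 hn hused,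
        pv_phase2 words out used note hused]
    cases hfind : (pvIdxsB words note).find? (fun i =>
        decide (start ≤ i) && !(PySem.Set.contains used (PySem.List.pyGetD words i ""))) with
    | some i =>
      have hi : i ∈ pvIdxsB words note := List.mem_of_find?_eq_some hfind
      rw [pv_idxs_eq] at hi
      have him := PySem.List.mem_pyRange_one.mp (List.mem_of_mem_filter hi)
      exact ih hrest _ _ _ (by omega) (by omega) (by
        intro x
        simp [PySem.Set.mem_add, hused])
    | none =>
      cases hfind2 : (pvIdxsB words note).find? (fun i =>
          !(PySem.Set.contains used (PySem.List.pyGetD words i ""))) with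
      | some i =>
        have hi : i ∈ pvIdxsB words note := List.mem_of_find?_eq_some hfind2
        rw [pv_idxs_eq] at hi
        have him := PySem.List.mem_pyRange_one.mp (List.mem_of_mem_filter hi)
        exact ih hrest _ _ _ (by omega) (by omega) (by
          intro x
          simp [PySem.Set.mem_add, hused])
      | none => rfl

theorem pv_while (words : List String) (fuel : Nat) (out : List String)
    (used : PySem.Set String) (start : Int)
    (h0 : 0 ≤ start) (hn : start ≤ (words.length : Int))
    (hused : ∀ x, x ∈ used ↔ x ∈ out) :
    pvWhileA words fuel out start = pvWhileB words (pvTableB words) fuel out used start := by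
  induction fuel generalizing out used start with
  | zero => rfl
  | succ fuel ih =>
    have h := pv_cycle words pvNotes (fun x hx => hx) out used start h0 hn hused
    simp only [pvWhileA, pvWhileB]
    have horder : pvOrder = pvNotes := rfl
    rw [horder]
    cases ha : pvCycleA words pvNotes out start with
    | inl o =>
      cases hb : pvCycleB words (pvTableB words) pvNotes out used start with
      | inl o' => rw [ha, hb] at h; exact h
      | inr st => rw [ha, hb] at h; exact absurd h (by simp [pvRel])
    | inr st =>
      cases hb : pvCycleB words (pvTableB words) pvNotes out used start with
      | inl o' => rw [ha, hb] at h; exact absurd h (by simp [pvRel])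
      | inr st' =>
        rw [ha, hb] at h
        obtain ⟨o, s⟩ := st
        obtain ⟨o', u', s'⟩ := st'
        obtain ⟨h1, h2, h3, h4, h5⟩ := h
        subst h1; subst h2
        exact ih o u' s h4 h5 h3

-- ===== VERDICT (by name: the statement is the Claim_ definition above) =====
theorem magic_music_box_spec : Claim_equal_magic_music_box := by
  intro words _
  unfold Spec_magic_music_box magic_music_box magic_music_box_alt
  by_cases hw : words = []
  · simp [hw]
  · simp only [if_neg hw]
    exact pv_while words (words.length + 1) [] PySem.Set.empty 0 le_rfl
      (by exact_mod_cast Nat.zero_le words.length) (fun x => by simp [PySem.Set.empty])
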